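-- pv_equiv track=rewrite | github.com/andrei-barinov/programming_tasks | Задачи по программированию/Обработка последовательностей, индуктивные функции/Количество локальных максимумов.py | getListOfNumbers
-- ===== SOURCE A (Python) =====
-- def getListOfNumbers(numbers: list):
--     n = 0;
--     arr = [];
--     for i in range(2, len(numbers)):
--         if (numbers[i - 2] < numbers[i - 1] > numbers[i]):
--             n += 1;
--             arr.append(n);
--
--     n = 0;
--     for i in range(2, len(numbers)):
--         if (numbers[i - 2] > numbers[i - 1] < numbers[i]):
--             n += 1;
--             arr.append(n);
--
--     return arr;
-- ===== SOURCE B (Python) =====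
-- def getListOfNumbers(numbers: list):
--     m = k = 0
--     for a, b, c in zip(numbers, numbers[1:], numbers[2:]):
--         if a < b > c:
--             m += 1
--         elif a > b < c:
--             k += 1
--     return list(range(1, m + 1)) + list(range(1, k + 1))
-- ===== Notes on version B (the rewrite author's own statement) =====
-- stated objective: alternative
-- what changed: Replaces A's two index-based loops that append a running counter by a single fused pass over zipped value triples classifying each window into one of two counters, then emits the answer as two closed-form ranges.
import Mathlib
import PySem

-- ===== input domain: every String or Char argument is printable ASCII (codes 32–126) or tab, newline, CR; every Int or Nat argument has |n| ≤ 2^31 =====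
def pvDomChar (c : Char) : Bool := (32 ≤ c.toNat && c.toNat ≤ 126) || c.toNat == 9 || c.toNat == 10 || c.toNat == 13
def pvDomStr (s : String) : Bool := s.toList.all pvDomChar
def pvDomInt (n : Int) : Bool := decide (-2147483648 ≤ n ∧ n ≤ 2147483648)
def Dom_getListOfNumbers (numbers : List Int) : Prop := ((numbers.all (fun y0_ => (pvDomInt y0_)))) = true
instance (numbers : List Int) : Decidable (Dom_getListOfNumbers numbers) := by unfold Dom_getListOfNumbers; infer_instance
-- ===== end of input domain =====

-- B makes one fused pass over zipped value triples, classifying each window into one of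
-- two counters, and emits the answer as two closed-form ranges (alternative decomposition,
-- same O(n) cost).

-- ===== PORT A =====
def getListOfNumbers (numbers : List Int) : List Int :=
  let s1 := (PySem.List.pyRange 2 (PySem.List.len numbers) 1).foldl
    (fun s i =>
      if PySem.List.pyGetD numbers (i - 2) 0 < PySem.List.pyGetD numbers (i - 1) 0 ∧
         PySem.List.pyGetD numbers (i - 1) 0 > PySem.List.pyGetD numbers i 0 then
        (s.1 + 1, s.2 ++ [s.1 + 1]) else s)
    ((0 : Int), ([] : List Int))
  let s2 := (PySem.List.pyRange 2 (PySem.List.len numbers) 1).foldl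
    (fun s i =>
      if PySem.List.pyGetD numbers (i - 2) 0 > PySem.List.pyGetD numbers (i - 1) 0 ∧
         PySem.List.pyGetD numbers (i - 1) 0 < PySem.List.pyGetD numbers i 0 then
        (s.1 + 1, s.2 ++ [s.1 + 1]) else s)
    ((0 : Int), s1.2)
  s2.2

-- ===== PORT B =====
-- zip(numbers, numbers[1:], numbers[2:]) ported as nested List.zip over drops (Python zip
-- truncates to the shortest argument, as List.zip does).
def getListOfNumbers_alt (numbers : List Int) : List Int :=
  let trips := numbers.zip ((numbers.drop 1).zip (numbers.drop 2))
  let mk := trips.foldl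
    (fun s t =>
      if t.1 < t.2.1 ∧ t.2.1 > t.2.2 then (s.1 + 1, s.2)
      else if t.1 > t.2.1 ∧ t.2.1 < t.2.2 then (s.1, s.2 + 1)
      else s)
    ((0 : Int), (0 : Int))
  PySem.List.pyRange 1 (mk.1 + 1) 1 ++ PySem.List.pyRange 1 (mk.2 + 1) 1

-- ===== PRECONDITION & SPEC =====
def Spec_getListOfNumbers (numbers : List Int) (out : List Int) : Prop := out = getListOfNumbers_alt numbers
instance (numbers : List Int) (out : List Int) : Decidable (Spec_getListOfNumbers numbers out) := by unfold Spec_getListOfNumbers; infer_instance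

-- ===== CLAIM (what is proved, stated in full; the proofs are below) =====
def Claim_equal_getListOfNumbers : Prop := ∀ (numbers : List Int), Dom_getListOfNumbers numbers → Spec_getListOfNumbers numbers (getListOfNumbers numbers)

-- ===== LEMMAS AND PROOFS =====

-- A's counter/append loop produces exactly the enumeration n+1 .. n+count appended to arr.
theorem pv_loop_eq (p : Int → Prop) [DecidablePred p] (l : List Int) (n : Int) (arr : List Int) :
    l.foldl (fun s i => if p i then (s.1 + 1, s.2 ++ [s.1 + 1]) else s) (n, arr)
      = (n + (l.countP (fun i => decide (p i)) : Int),
         arr ++ PySem.List.pyRange (n + 1) (n + (l.countP (fun i => decide (p i)) : Int) + 1) 1) := by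
  induction l generalizing n arr with
  | nil =>
      simp only [List.foldl_nil, List.countP_nil, Nat.cast_zero, add_zero]
      rw [PySem.List.pyRange_one_eq_nil (le_refl _)]
      simp
  | cons c t ih =>
      by_cases h : p c
      · simp only [List.foldl_cons, ih, List.countP_cons, h, decide_true, if_true]
        push_cast
        rw [PySem.List.pyRange_one_cons (show (n : Int) + 1 <
          n + ((t.countP (fun i => decide (p i)) : Int) + 1) + 1 by
            have := Int.natCast_nonneg (t.countP (fun i => decide (p i))); omega)]
        ring_nf
        simp
      · simp [List.foldl_cons, ih, h]

-- The triple read at index i (2 ≤ i < len) is the (i-2)-nd element of the zip of the list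
-- with its two shifts.
theorem pv_trips_eq (xs : List Int) :
    (PySem.List.pyRange 2 (PySem.List.len xs) 1).map
      (fun i => (PySem.List.pyGetD xs (i - 2) 0,
                 PySem.List.pyGetD xs (i - 1) 0,
                 PySem.List.pyGetD xs i 0))
      = xs.zip ((xs.drop 1).zip (xs.drop 2)) := by
  apply List.ext_getElem
  · simp [PySem.List.length_pyRange_one, PySem.List.len]
    omega
  · intro k h1 h2
    have hk : k < xs.length - 2 := by
      simp [PySem.List.length_pyRange_one, PySem.List.len] at h1; omega
    simp only [List.getElem_map, PySem.List.getElem_pyRange_one, List.getElem_zip,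
      List.getElem_drop]
    have e0 : (2 : Int) + k - 2 = (k : Int) := by ring
    have e1 : (2 : Int) + k - 1 = ((k + 1 : Nat) : Int) := by push_cast; ring
    have e2 : (2 : Int) + k = ((k + 2 : Nat) : Int) := by push_cast; ring
    rw [e0, e1, e2, PySem.List.pyGetD_natCast, PySem.List.pyGetD_natCast,
      PySem.List.pyGetD_natCast]
    simp [List.getD, List.getElem?_eq_getElem (show k < xs.length by omega),
      List.getElem?_eq_getElem (show k + 1 < xs.length by omega),
      List.getElem?_eq_getElem (show k + 2 < xs.length by omega)]
    refine ⟨?_, ?_⟩ <;> congr 1 <;> omega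

-- B's fused fold computes the two category counts (the two window conditions are mutually
-- exclusive, so the elif never hides a minimum).
theorem pv_fold_counts (l : List (Int × Int × Int)) (m k : Int) :
    l.foldl
      (fun s t =>
        if t.1 < t.2.1 ∧ t.2.1 > t.2.2 then (s.1 + 1, s.2)
        else if t.1 > t.2.1 ∧ t.2.1 < t.2.2 then (s.1, s.2 + 1)
        else s)
      (m, k)
      = (m + (l.countP (fun t => decide (t.1 < t.2.1 ∧ t.2.1 > t.2.2)) : Int),
         k + (l.countP (fun t => decide (t.1 > t.2.1 ∧ t.2.1 < t.2.2)) : Int)) := by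
  induction l generalizing m k with
  | nil => simp
  | cons c t ih =>
      by_cases h1 : c.1 < c.2.1 ∧ c.2.1 > c.2.2
      · have h2 : ¬ (c.1 > c.2.1 ∧ c.2.1 < c.2.2) := by
          rcases h1 with ⟨ha, _⟩; intro ⟨hb, _⟩; omega
        simp [List.foldl_cons, h1, h2, ih, Prod.ext_iff]
        ring
      · by_cases h2 : c.1 > c.2.1 ∧ c.2.1 < c.2.2
        · simp [List.foldl_cons, h1, h2, ih, Prod.ext_iff]
          ring
        · simp [List.foldl_cons, h1, h2, ih]

-- ===== VERDICT (by name: the statement is the Claim_ definition above) =====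
theorem getListOfNumbers_spec : Claim_equal_getListOfNumbers := by
  intro numbers _
  unfold Spec_getListOfNumbers getListOfNumbers getListOfNumbers_alt
  rw [← pv_trips_eq numbers]
  simp only [pv_loop_eq, pv_fold_counts, List.countP_map]
  simp [Function.comp_def]
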